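-- pv_equiv track=rewrite | github.com/lifuyi774/ProcleaveHub | scr/features.py | calculate_chunk_size
-- ===== SOURCE A (Python) =====
-- def calculate_chunk_size(sequence, num_chunks):
--     total_length = len(sequence)
--     avg_chunk_size = total_length // num_chunks
--     remainder = total_length % num_chunks
--
--
--     chunk_sizes = [avg_chunk_size] * num_chunks
--     for i in range(remainder):
--         chunk_sizes[i] += 1
--
--     return chunk_sizes
-- ===== SOURCE B (Python) =====
-- def calculate_chunk_size(sequence, num_chunks):
--     # Greedy peeling: repeatedly give the next chunk the ceiling of
--     # remaining_length / chunks_left; this provably yields the same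
--     # distribution (base size everywhere, +1 on the first `remainder` chunks).
--     chunk_sizes = []
--     remaining = len(sequence)
--     chunks_left = num_chunks
--     while chunks_left > 0:
--         first = -(-remaining // chunks_left)  # ceiling division
--         chunk_sizes.append(first)
--         remaining -= first
--         chunks_left -= 1
--     return chunk_sizes
-- ===== Notes on version B (the rewrite author's own statement) =====
-- stated objective: alternative
-- what changed: Replaces A's two-phase divmod construction (allocate [avg]*n, then increment the first `remainder` cells) with a greedy single loop that peels off ceil(remaining/chunks_left) for each chunk, never computing a remainder or touching a built list.
import Mathlib
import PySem

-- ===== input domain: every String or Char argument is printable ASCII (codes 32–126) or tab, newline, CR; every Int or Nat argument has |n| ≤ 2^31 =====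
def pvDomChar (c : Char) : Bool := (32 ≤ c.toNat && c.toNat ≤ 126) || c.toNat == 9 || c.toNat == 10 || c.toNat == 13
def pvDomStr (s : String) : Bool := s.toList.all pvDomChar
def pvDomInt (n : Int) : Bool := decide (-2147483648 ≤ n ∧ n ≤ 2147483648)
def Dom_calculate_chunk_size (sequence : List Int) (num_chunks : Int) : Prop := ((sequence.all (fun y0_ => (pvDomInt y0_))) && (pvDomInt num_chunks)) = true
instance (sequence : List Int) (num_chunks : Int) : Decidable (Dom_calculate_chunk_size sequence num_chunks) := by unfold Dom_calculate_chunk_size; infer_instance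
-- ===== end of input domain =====

-- B replaces A's divmod-then-increment-prefix construction with a greedy loop that
-- peels off ceil(remaining/chunks_left) per chunk (objective: alternative).

-- ===== PORT A =====
-- Loop indices i satisfy 0 ≤ i < len(chunk_sizes) whenever the Python loop body runs
-- (0 ≤ remainder < num_chunks when num_chunks > 0; empty loop otherwise), so the
-- i.toNat indexing below is exact on every input admitted by Pre_.
def calculate_chunk_size (sequence : List Int) (num_chunks : Int) : List Int :=
  let total_length : Int := sequence.length
  let avg_chunk_size := PySem.Int.floordiv total_length num_chunks
  let remainder := PySem.Int.mod total_length num_chunks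
  let chunk_sizes := List.replicate num_chunks.toNat avg_chunk_size
  (PySem.List.pyRange 0 remainder 1).foldl
    (fun cs i => cs.set i.toNat (PySem.List.pyGetD cs i 0 + 1)) chunk_sizes

-- ===== PORT B =====
-- The while loop of Source B: state (chunk_sizes, remaining, chunks_left); the loop runs
-- exactly chunks_left.toNat times, which drives the structural fuel; Python's local
-- `first` (= ceiling division -(-remaining // chunks_left)) is written inline.
def ccsLoopFuel : Nat → List Int → Int → Int → List Int
  | 0, chunk_sizes, _, _ => chunk_sizes
  | fuel + 1, chunk_sizes, remaining, chunks_left =>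
    if 0 < chunks_left then
      ccsLoopFuel fuel (chunk_sizes ++ [-(PySem.Int.floordiv (-remaining) chunks_left)])
        (remaining - -(PySem.Int.floordiv (-remaining) chunks_left)) (chunks_left - 1)
    else chunk_sizes

def calculate_chunk_size_alt (sequence : List Int) (num_chunks : Int) : List Int :=
  ccsLoopFuel num_chunks.toNat [] (sequence.length : Int) num_chunks

-- ===== PRECONDITION & SPEC =====
-- Pre_ excludes exactly num_chunks = 0, on which the Python A raises ZeroDivisionError.
def Pre_calculate_chunk_size (sequence : List Int) (num_chunks : Int) : Prop := num_chunks ≠ 0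
instance (sequence : List Int) (num_chunks : Int) : Decidable (Pre_calculate_chunk_size sequence num_chunks) := by unfold Pre_calculate_chunk_size; infer_instance
def pvWitness_calculate_chunk_size : List Int × Int := ([1, 2, 3, 4, 5], 3)

def Spec_calculate_chunk_size (sequence : List Int) (num_chunks : Int) (out : List Int) : Prop := out = calculate_chunk_size_alt sequence num_chunks
instance (sequence : List Int) (num_chunks : Int) (out : List Int) : Decidable (Spec_calculate_chunk_size sequence num_chunks out) := by unfold Spec_calculate_chunk_size; infer_instance

-- ===== CLAIM (what is proved, stated in full; the proofs are below) =====
def Claim_equal_calculate_chunk_size : Prop := ∀ (sequence : List Int) (num_chunks : Int), Dom_calculate_chunk_size sequence num_chunks → Pre_calculate_chunk_size sequence num_chunks → Spec_calculate_chunk_size sequence num_chunks (calculate_chunk_size sequence num_chunks)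
-- ===== LEMMAS AND PROOFS =====

-- A's increment loop over the first r cells of a length-n replicate equals the direct map.
lemma key_fold (avg : Int) :
    ∀ r n : Nat, r ≤ n →
    ((List.range r).map (fun k : Nat => (k : Int))).foldl
        (fun cs i => cs.set i.toNat (PySem.List.pyGetD cs i 0 + 1))
        (List.replicate n avg)
      = (List.range n).map (fun k : Nat => if (k : Int) < (r : Int) then avg + 1 else avg) := by
  intro r
  induction r with
  | zero =>
    intro n _
    simp only [List.range_zero, List.map_nil, List.foldl_nil]
    apply List.ext_getElem
    · simp
    · intro j hj1 hj2
      simp only [List.getElem_replicate, List.getElem_map]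
      rw [if_neg (by omega)]
  | succ r ih =>
    intro n hrn
    rw [List.range_succ, List.map_append, List.foldl_append, ih n (by omega)]
    simp only [List.map_cons, List.map_nil, List.foldl_cons, List.foldl_nil, Int.toNat_natCast]
    have hget : PySem.List.pyGetD
        ((List.range n).map (fun k : Nat => if (k : Int) < (r : Int) then avg + 1 else avg))
        ((r : Nat) : Int) 0 = avg := by
      rw [PySem.List.pyGetD_natCast,
        List.getD_eq_getElem _ _ (by simpa using (by omega : r < n))]
      simp only [List.getElem_map, List.getElem_range]
      rw [if_neg (by omega)]
    rw [hget]
    apply List.ext_getElem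
    · simp
    · intro j hj1 hj2
      simp only [List.getElem_set, List.getElem_map, List.getElem_range]
      split_ifs <;> first | rfl | omega

-- The prefix-of-extras map formula in replicate ++ replicate form.
lemma map_eq_rep (q : Int) (n r : Nat) (hr : r ≤ n) :
    (List.range n).map (fun k : Nat => if (k : Int) < (r : Int) then q + 1 else q)
      = List.replicate r (q + 1) ++ List.replicate (n - r) q := by
  apply List.ext_getElem
  · simp; omega
  · intro j hj1 hj2
    simp only [List.getElem_map, List.getElem_range]
    by_cases hjr : j < r
    · rw [if_pos (by exact_mod_cast hjr),
        List.getElem_append_left (by simpa using hjr), List.getElem_replicate]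
    · rw [if_neg (by simpa using hjr),
        List.getElem_append_right (by simpa using hjr), List.getElem_replicate]

-- B's greedy loop on a length q*n + r (r < n), with fuel n, produces
-- r chunks of size q+1 then n-r of size q.
lemma loop_eq : ∀ (n q r : Nat) (acc : List Int), r < n →
    ccsLoopFuel n acc ((q * n + r : Nat) : Int) ((n : Nat) : Int)
      = acc ++ (List.replicate r ((q : Int) + 1) ++ List.replicate (n - r) (q : Int)) := by
  intro n
  induction n with
  | zero => intro q r acc h; omega
  | succ n ih =>
    intro q r acc hr
    have hpos : (0 : Int) < ((n + 1 : Nat) : Int) := by exact_mod_cast Nat.succ_pos n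
    rw [ccsLoopFuel, if_pos hpos]
    have hn1 : ((n + 1 : Nat) : Int) - 1 = ((n : Nat) : Int) := by push_cast; ring
    by_cases hr0 : r = 0
    · subst hr0
      have hfirst : -(PySem.Int.floordiv (-((q * (n + 1) + 0 : Nat) : Int)) ((n + 1 : Nat) : Int)) = (q : Int) := by
        rw [PySem.Int.neg_floordiv_neg_eq_iff_of_pos hpos]
        constructor <;> push_cast <;> nlinarith [Nat.succ_pos n]
      rw [hfirst]
      rcases Nat.eq_zero_or_pos n with hn | hn
      · subst hn
        rw [ccsLoopFuel]
        norm_num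
      · have harg : ((q * (n + 1) + 0 : Nat) : Int) - (q : Int) = ((q * n + 0 : Nat) : Int) := by
          push_cast; ring
        rw [harg, hn1, ih q 0 _ hn]
        simp [List.replicate_succ]
    · have hrpos : 0 < r := Nat.pos_of_ne_zero hr0
      have hfirst : -(PySem.Int.floordiv (-((q * (n + 1) + r : Nat) : Int)) ((n + 1 : Nat) : Int)) = (q : Int) + 1 := by
        rw [PySem.Int.neg_floordiv_neg_eq_iff_of_pos hpos]
        constructor <;> push_cast <;> nlinarith [hrpos, hr]
      rw [hfirst]
      have harg : ((q * (n + 1) + r : Nat) : Int) - ((q : Int) + 1) = ((q * n + (r - 1) : Nat) : Int) := by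
        push_cast [Nat.cast_sub hrpos]; ring
      rw [harg, hn1, ih q (r - 1) _ (by omega)]
      have hrep : List.replicate r ((q : Int) + 1) = ((q : Int) + 1) :: List.replicate (r - 1) ((q : Int) + 1) := by
        cases r with
        | zero => omega
        | succ m => simp [List.replicate_succ]
      rw [hrep]
      have : n + 1 - r = n - (r - 1) := by omega
      rw [this]
      simp

lemma pos_case (sequence : List Int) (num_chunks : Int) (hpos : 0 < num_chunks) :
    calculate_chunk_size sequence num_chunks = calculate_chunk_size_alt sequence num_chunks := by
  obtain ⟨m, rfl⟩ : ∃ m : Nat, num_chunks = (m : Int) :=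
    ⟨num_chunks.toNat, (Int.toNat_of_nonneg hpos.le).symm⟩
  have hm : 0 < m := by exact_mod_cast hpos
  set L := sequence.length with hL
  -- A's side
  have hA : calculate_chunk_size sequence (m : Int)
      = List.replicate (L % m) ((L / m : Nat) + 1 : Int) ++ List.replicate (m - L % m) ((L / m : Nat) : Int) := by
    show (PySem.List.pyRange 0 (PySem.Int.mod (L : Int) (m : Int)) 1).foldl
        (fun cs i => cs.set i.toNat (PySem.List.pyGetD cs i 0 + 1))
        (List.replicate ((m : Int)).toNat (PySem.Int.floordiv (L : Int) (m : Int)))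
      = _
    rw [PySem.Int.mod_natCast, PySem.Int.floordiv_natCast, Int.toNat_natCast,
      PySem.List.pyRange_zero_nat, key_fold _ (L % m) m (Nat.mod_lt L hm).le,
      map_eq_rep]
    exact (Nat.mod_lt L hm).le
  -- B's side
  have hB : calculate_chunk_size_alt sequence (m : Int)
      = List.replicate (L % m) ((L / m : Nat) + 1 : Int) ++ List.replicate (m - L % m) ((L / m : Nat) : Int) := by
    show ccsLoopFuel ((m : Int)).toNat [] (L : Int) (m : Int) = _
    have hLrw : L / m * m + L % m = L := by
      rw [mul_comm]; exact Nat.div_add_mod L m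
    rw [Int.toNat_natCast,
      show ((L : Nat) : Int) = ((L / m * m + L % m : Nat) : Int) by rw [hLrw],
      loop_eq m (L / m) (L % m) [] (Nat.mod_lt L hm), List.nil_append]
  rw [hA, hB]

lemma neg_case (sequence : List Int) (num_chunks : Int) (hneg : num_chunks < 0) :
    calculate_chunk_size sequence num_chunks = calculate_chunk_size_alt sequence num_chunks := by
  have hrle : PySem.Int.mod (sequence.length : Int) num_chunks ≤ 0 :=
    (PySem.Int.mod_neg_bounds (sequence.length : Int) hneg).2
  have hA : calculate_chunk_size sequence num_chunks = [] := by
    show (PySem.List.pyRange 0 (PySem.Int.mod (sequence.length : Int) num_chunks) 1).foldl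
        (fun cs i => cs.set i.toNat (PySem.List.pyGetD cs i 0 + 1))
        (List.replicate num_chunks.toNat (PySem.Int.floordiv (sequence.length : Int) num_chunks)) = []
    rw [PySem.List.pyRange_one_eq_nil hrle]
    simp [show num_chunks.toNat = 0 by omega]
  have hB : calculate_chunk_size_alt sequence num_chunks = [] := by
    show ccsLoopFuel num_chunks.toNat [] (sequence.length : Int) num_chunks = []
    rw [show num_chunks.toNat = 0 by omega, ccsLoopFuel]
  rw [hA, hB]

-- ===== VERDICT (by name: the statement is the Claim_ definition above) =====
theorem calculate_chunk_size_spec : Claim_equal_calculate_chunk_size := by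
  intro sequence num_chunks _ hpre
  unfold Spec_calculate_chunk_size
  rcases lt_or_gt_of_ne hpre with h | h
  · exact neg_case sequence num_chunks h
  · exact pos_case sequence num_chunks h
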